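-- pv_equiv track=rewrite | github.com/James-abc-xyz/gomoku-app | main.py | evaluate_line
-- ===== SOURCE A (Python) =====
-- EMPTY = 0
--
-- BLACK = 1  # 玩家
--
-- WHITE = 2  # AI
--
-- SCORE_TABLE = {
--     (1, 0): 10,
--     (2, 0): 100,
--     (3, 0): 1000,
--     (4, 0): 10000,
--     (5, 0): 1000000,
--     (1, 1): 5,
--     (2, 1): 50,
--     (3, 1): 500,
--     (4, 1): 5000,
-- }
--
-- def evaluate_line(line, player):
--     """评估一条线的分数"""
--     opponent = WHITE if player == BLACK else BLACK
--     score = 0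
--     n = len(line)
--     i = 0
--     while i < n:
--         if line[i] == player:
--             count = 0
--             open_ends = 0
--             if i == 0 or line[i - 1] == EMPTY:
--                 open_ends += 1
--             j = i
--             while j < n and line[j] == player:
--                 count += 1
--                 j += 1
--             if j == n or line[j] == EMPTY:
--                 open_ends += 1
--             if count >= 5:
--                 score += 1000000
--             elif count in (1, 2, 3, 4):
--                 blocked = 2 - open_ends
--                 score += SCORE_TABLE.get((count, blocked), 0)
--             i = j
--         else:
--             i += 1
--     return score
-- ===== SOURCE B (Python) =====
-- EMPTY = 0
--
-- BLACK = 1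
--
-- WHITE = 2
--
-- SCORE_TABLE = {
--     (1, 0): 10,
--     (2, 0): 100,
--     (3, 0): 1000,
--     (4, 0): 10000,
--     (5, 0): 1000000,
--     (1, 1): 5,
--     (2, 1): 50,
--     (3, 1): 500,
--     (4, 1): 5000,
-- }
--
-- def evaluate_line(line, player):
--     """评估一条线的分数"""
--     # phase 1: run-length encode the line as (value, count) pairs
--     runs = []
--     run_v, run_c = 0, 0   # current open run; empty iff run_c == 0
--     for v in line:
--         if run_c > 0 and v == run_v:
--             run_c += 1
--         else:
--             if run_c > 0:
--                 runs.append((run_v, run_c))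
--             run_v, run_c = v, 1
--     if run_c > 0:
--         runs.append((run_v, run_c))
--     # phase 2: score each player run from its neighbouring runs
--     total = 0
--     prev = None   # value of the run before the current one
--     for k, (v, c) in enumerate(runs):
--         if v == player:
--             left_open = prev is None or prev == EMPTY
--             right_open = k + 1 == len(runs) or runs[k + 1][0] == EMPTY
--             open_ends = int(left_open) + int(right_open)
--             total += 1000000 if c >= 5 else SCORE_TABLE.get((c, 2 - open_ends), 0)
--         prev = v
--     return total
-- ===== Notes on version B (the rewrite author's own statement) =====
-- stated objective: alternative
-- what changed: B replaces A's single index scan (outer while with an inner run-counting while and index jumps) by a two-phase decomposition: run-length encode the line into (value,count) pairs, then score each player run by looking at the adjacent runs.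
import Mathlib
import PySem

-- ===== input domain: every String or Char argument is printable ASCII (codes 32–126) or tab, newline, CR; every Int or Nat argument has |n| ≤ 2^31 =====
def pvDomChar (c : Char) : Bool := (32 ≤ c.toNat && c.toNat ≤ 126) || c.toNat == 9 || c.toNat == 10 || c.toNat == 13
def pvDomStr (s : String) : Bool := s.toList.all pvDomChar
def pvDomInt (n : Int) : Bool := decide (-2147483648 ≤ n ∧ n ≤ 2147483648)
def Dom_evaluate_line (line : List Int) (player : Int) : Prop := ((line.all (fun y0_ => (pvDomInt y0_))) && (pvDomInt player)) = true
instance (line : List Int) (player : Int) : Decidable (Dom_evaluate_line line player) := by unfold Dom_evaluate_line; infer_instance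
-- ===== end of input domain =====

-- B re-implements the scorer as run-length encoding followed by a scan over the runs (different decomposition, same values; no speed claim).

-- SCORE_TABLE, shared module constant of both versions (a Python dict keyed by (count, blocked))
def pvScoreTable : PySem.Dict (Int × Int) Int :=
  PySem.Dict.ofList [((1, 0), 10), ((2, 0), 100), ((3, 0), 1000), ((4, 0), 10000), ((5, 0), 1000000),
   ((1, 1), 5), ((2, 1), 50), ((3, 1), 500), ((4, 1), 5000)]

-- ===== PORT A =====
-- inner 'while j < n and line[j] == player' loop: consumes the run, returns (count, rest of the line)
def pvTakeRun (player : Int) : List Int → Int × List Int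
  | [] => (0, [])
  | x :: xs =>
    if x = player then
      let r := pvTakeRun player xs
      (r.1 + 1, r.2)
    else (0, x :: xs)

theorem pvTakeRun_len_le (player : Int) (l : List Int) : (pvTakeRun player l).2.length ≤ l.length := by
  induction l with
  | nil => simp [pvTakeRun]
  | cons x xs ih =>
    by_cases h : x = player
    · simp [pvTakeRun, h]; omega
    · simp [pvTakeRun, h]

-- outer 'while i < n' loop; prev = line[i-1] (none when i == 0)
def pvEvalGo (player : Int) (prev : Option Int) (line : List Int) (score : Int) : Int :=
  match line with
  | [] => score
  | x :: xs =>
    if hx : x = player then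
      let leftOpen : Int := if prev = none ∨ prev = some 0 then 1 else 0
      let count := (pvTakeRun player (x :: xs)).1
      let rest := (pvTakeRun player (x :: xs)).2
      let openEnds : Int := leftOpen + (if rest = [] ∨ rest.head? = some 0 then 1 else 0)
      let s : Int :=
        if count ≥ 5 then 1000000
        else if count = 1 ∨ count = 2 ∨ count = 3 ∨ count = 4 then
          PySem.Dict.getD pvScoreTable (count, 2 - openEnds) 0
        else 0
      pvEvalGo player (some player) rest (score + s)
    else pvEvalGo player (some x) xs score
  termination_by line.length
  decreasing_by
  · simp only [pvTakeRun, hx, if_pos]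
    have := pvTakeRun_len_le player xs
    simpa using Nat.lt_succ_of_le this
  · simp

def evaluate_line (line : List Int) (player : Int) : Int :=
  let _opponent : Int := if player = 1 then 2 else 1
  pvEvalGo player none line 0

-- ===== PORT B =====
-- phase-1 loop body: state = (closed runs, current run value, current run count; empty run iff count = 0)
def pvRunStep (st : List (Int × Int) × Int × Int) (v : Int) : List (Int × Int) × Int × Int :=
  if 0 < st.2.2 ∧ v = st.2.1 then (st.1, st.2.1, st.2.2 + 1)
  else ((if 0 < st.2.2 then st.1 ++ [(st.2.1, st.2.2)] else st.1), v, 1)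

-- run-length encoding of the line (phase 1 of Source B, plus the trailing flush)
def pvRuns (line : List Int) : List (Int × Int) :=
  let st := line.foldl pvRunStep ([], 0, 0)
  if 0 < st.2.2 then st.1 ++ [(st.2.1, st.2.2)] else st.1

-- phase-2 loop over the runs, carrying prev; the k+1 lookahead reads the head of the remaining runs
def pvScoreRuns (player : Int) (runs : List (Int × Int)) (prev : Option Int) : Int :=
  match runs with
  | [] => 0
  | (v, c) :: rest =>
    let s : Int :=
      if v = player then
        let leftOpen : Int := if prev = none ∨ prev = some 0 then 1 else 0
        let rightOpen : Int := if rest = [] ∨ (rest.head?.map Prod.fst) = some 0 then 1 else 0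
        if c ≥ 5 then 1000000 else PySem.Dict.getD pvScoreTable (c, 2 - (leftOpen + rightOpen)) 0
      else 0
    s + pvScoreRuns player rest (some v)

def evaluate_line_alt (line : List Int) (player : Int) : Int :=
  pvScoreRuns player (pvRuns line) none

-- ===== PRECONDITION & SPEC =====
def Spec_evaluate_line (line : List Int) (player : Int) (out : Int) : Prop := out = evaluate_line_alt line player
instance (line : List Int) (player : Int) (out : Int) : Decidable (Spec_evaluate_line line player out) := by unfold Spec_evaluate_line; infer_instance

-- ===== CLAIM (what is proved, stated in full; the proofs are below) =====
def Claim_equal_evaluate_line : Prop := ∀ (line : List Int) (player : Int), Dom_evaluate_line line player → Spec_evaluate_line line player (evaluate_line line player)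

-- ===== LEMMAS AND PROOFS =====

-- the run builder started on a non-empty current run (proof-side view of phase 1)
def pvRunsFrom (rv rc : Int) (xs : List Int) : List (Int × Int) :=
  let st := xs.foldl pvRunStep ([], rv, rc)
  if 0 < st.2.2 then st.1 ++ [(st.2.1, st.2.2)] else st.1

-- the closed-runs accumulator only ever grows at the back
theorem pvFoldl_runStep_acc (xs : List Int) : ∀ (acc : List (Int × Int)) (rv rc : Int),
    xs.foldl pvRunStep (acc, rv, rc) =
      (acc ++ (xs.foldl pvRunStep ([], rv, rc)).1, (xs.foldl pvRunStep ([], rv, rc)).2) := by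
  induction xs with
  | nil => intro acc rv rc; simp
  | cons y ys ih =>
    intro acc rv rc
    simp only [List.foldl_cons]
    by_cases h : 0 < rc ∧ y = rv
    · simp only [pvRunStep, if_pos h]
      exact ih acc rv (rc + 1)
    · simp only [pvRunStep, if_neg h]
      by_cases hc : 0 < rc
      · simp only [if_pos hc, List.nil_append]
        rw [ih (acc ++ [(rv, rc)]) y 1, ih [(rv, rc)] y 1]
        simp
      · simp only [if_neg hc]
        exact ih acc y 1

theorem pvRunsFrom_cons (rv rc y : Int) (ys : List Int) (hrc : 0 < rc) :
    pvRunsFrom rv rc (y :: ys) =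
      if y = rv then pvRunsFrom rv (rc + 1) ys else (rv, rc) :: pvRunsFrom y 1 ys := by
  by_cases hy : y = rv
  · simp [pvRunsFrom, pvRunStep, hrc, hy]
  · have hcond : ¬ (0 < rc ∧ y = rv) := fun h => hy h.2
    simp only [pvRunsFrom, List.foldl_cons, pvRunStep, hy, and_false, if_false, if_pos hrc, List.nil_append]
    rw [pvFoldl_runStep_acc ys [(rv, rc)] y 1]
    by_cases h : 0 < (ys.foldl pvRunStep ([], y, 1)).2.2 <;> simp [h]

theorem pvRuns_cons (x : Int) (xs : List Int) : pvRuns (x :: xs) = pvRunsFrom x 1 xs := by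
  simp [pvRuns, pvRunsFrom, pvRunStep]

-- the rest left by pvTakeRun never starts with the player
theorem pvTakeRun_count_nonneg (player : Int) (l : List Int) : 0 ≤ (pvTakeRun player l).1 := by
  induction l with
  | nil => simp [pvTakeRun]
  | cons x xs ih =>
    by_cases h : x = player
    · simp [pvTakeRun, h]; omega
    · simp [pvTakeRun, h]

theorem pvTakeRun_rest_head (player : Int) (l : List Int) :
    (pvTakeRun player l).2.head? ≠ some player := by
  induction l with
  | nil => simp [pvTakeRun]
  | cons x xs ih =>
    by_cases h : x = player
    · simpa [pvTakeRun, h] using ih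
    · simp [pvTakeRun, h]

-- an open run absorbs exactly the pvTakeRun prefix
theorem pvRunsFrom_takeRun (rv : Int) (xs : List Int) : ∀ (rc : Int), 0 < rc →
    pvRunsFrom rv rc xs = (rv, rc + (pvTakeRun rv xs).1) :: pvRuns (pvTakeRun rv xs).2 := by
  induction xs with
  | nil => intro rc hrc; simp [pvRunsFrom, pvTakeRun, pvRuns, hrc]
  | cons y ys ih =>
    intro rc hrc
    rw [pvRunsFrom_cons rv rc y ys hrc]
    by_cases hy : y = rv
    · subst hy
      rw [if_pos rfl, ih (rc + 1) (by omega)]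
      simp only [pvTakeRun]
      have h3 : ∀ t : Int, rc + 1 + t = rc + (t + 1) := fun t => by ring
      rw [h3]
      simp
    · rw [if_neg hy]
      simp only [pvTakeRun, if_neg hy]
      rw [← pvRuns_cons]
      norm_num

-- head value of the run list is the head of the line
theorem pvRuns_head (line : List Int) : (pvRuns line).head?.map Prod.fst = line.head? := by
  cases line with
  | nil => simp [pvRuns]
  | cons x xs =>
    rw [pvRuns_cons, pvRunsFrom_takeRun x xs 1 one_pos]
    simp

theorem pvRuns_eq_nil_iff (line : List Int) : pvRuns line = [] ↔ line = [] := by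
  cases line with
  | nil => simp [pvRuns]
  | cons x xs =>
    rw [pvRuns_cons, pvRunsFrom_takeRun x xs 1 one_pos]
    simp

-- taking the player's run at the head splits off exactly the first run
theorem pvRuns_takeRun (player : Int) (line : List Int) (h : line.head? = some player) :
    pvRuns line = (player, (pvTakeRun player line).1) :: pvRuns (pvTakeRun player line).2 ∧
    1 ≤ (pvTakeRun player line).1 ∧ (pvTakeRun player line).2.head? ≠ some player := by
  cases line with
  | nil => simp at h
  | cons x xs =>
    simp only [List.head?_cons, Option.some.injEq] at h
    subst h
    have htake : pvTakeRun x (x :: xs) = ((pvTakeRun x xs).1 + 1, (pvTakeRun x xs).2) := by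
      simp [pvTakeRun]
    rw [htake, pvRuns_cons, pvRunsFrom_takeRun x xs 1 one_pos]
    have h1 := pvTakeRun_count_nonneg x xs
    have h2 : (1 : Int) + (pvTakeRun x xs).1 = (pvTakeRun x xs).1 + 1 := by ring
    refine ⟨by rw [h2], by omega, ?_⟩
    simpa using pvTakeRun_rest_head x xs

-- skipping a non-player run cell by cell is skipping it whole
theorem pvScoreRuns_skip (player x : Int) (xs : List Int) (prev : Option Int) (hx : x ≠ player) :
    pvScoreRuns player (pvRuns (x :: xs)) prev = pvScoreRuns player (pvRuns xs) (some x) := by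
  rw [pvRuns_cons, pvRunsFrom_takeRun x xs 1 one_pos]
  cases xs with
  | nil => simp [pvTakeRun, pvScoreRuns, hx, pvRuns]
  | cons y ys =>
    by_cases hy : y = x
    · subst hy
      have htake : pvTakeRun y (y :: ys) = ((pvTakeRun y ys).1 + 1, (pvTakeRun y ys).2) := by
        simp [pvTakeRun]
      rw [pvRuns_cons, pvRunsFrom_takeRun y ys 1 one_pos, htake]
      simp [pvScoreRuns, hx]
    · have htake : pvTakeRun x (y :: ys) = (0, y :: ys) := by simp [pvTakeRun, hy]
      rw [htake]
      simp [pvScoreRuns, hx]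

-- main invariant: the cell-by-cell scan equals the run scan
theorem pvEvalGo_eq (player : Int) :
    ∀ (n : ℕ) (line : List Int), line.length ≤ n → ∀ (prev : Option Int) (score : Int),
      pvEvalGo player prev line score = score + pvScoreRuns player (pvRuns line) prev := by
  intro n
  induction n with
  | zero =>
    intro line hlen prev score
    have : line = [] := List.length_eq_zero_iff.mp (Nat.le_zero.mp hlen)
    subst this
    simp [pvEvalGo, pvRuns, pvScoreRuns]
  | succ n ih =>
    intro line hlen prev score
    cases line with
    | nil => simp [pvEvalGo, pvRuns, pvScoreRuns]
    | cons x xs =>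
      by_cases hx : x = player
      · subst hx
        obtain ⟨hruns, hc1, hhead⟩ := pvRuns_takeRun x (x :: xs) (by simp)
        rw [pvEvalGo, dif_pos rfl]
        have hrest_len : (pvTakeRun x (x :: xs)).2.length ≤ n := by
          have h1 := pvTakeRun_len_le x xs
          have h2 : pvTakeRun x (x :: xs) = ((pvTakeRun x xs).1 + 1, (pvTakeRun x xs).2) := by
            simp [pvTakeRun]
          rw [h2]
          simp only [List.length_cons] at hlen
          simpa using by omega
        rw [ih _ hrest_len]
        rw [hruns]
        simp only [pvScoreRuns]
        have hhead_eq : ((pvRuns (pvTakeRun x (x :: xs)).2).head?.map Prod.fst) =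
            (pvTakeRun x (x :: xs)).2.head? := pvRuns_head _
        have hnil_iff := pvRuns_eq_nil_iff (pvTakeRun x (x :: xs)).2
        -- the right-open tests agree
        have hright : (if pvRuns (pvTakeRun x (x :: xs)).2 = [] ∨
              ((pvRuns (pvTakeRun x (x :: xs)).2).head?.map Prod.fst) = some 0 then (1 : Int) else 0) =
            (if (pvTakeRun x (x :: xs)).2 = [] ∨ (pvTakeRun x (x :: xs)).2.head? = some 0 then (1 : Int) else 0) := by
          rw [hhead_eq]
          by_cases h : (pvTakeRun x (x :: xs)).2 = [] ∨ (pvTakeRun x (x :: xs)).2.head? = some 0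
          · rw [if_pos h, if_pos]
            rcases h with h | h
            · exact Or.inl (hnil_iff.mpr h)
            · exact Or.inr h
          · rw [if_neg h, if_neg]
            intro hcon
            rcases hcon with hcon | hcon
            · exact h (Or.inl (hnil_iff.mp hcon))
            · exact h (Or.inr hcon)
        rw [hright]
        -- the score branch: count ≥ 1 so the 'elif count in (1,2,3,4)' test is redundant below 5
        have hbranch : ∀ oe : Int,
            (if (pvTakeRun x (x :: xs)).1 ≥ 5 then (1000000 : Int)
             else if (pvTakeRun x (x :: xs)).1 = 1 ∨ (pvTakeRun x (x :: xs)).1 = 2 ∨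
                  (pvTakeRun x (x :: xs)).1 = 3 ∨ (pvTakeRun x (x :: xs)).1 = 4 then
               PySem.Dict.getD pvScoreTable ((pvTakeRun x (x :: xs)).1, 2 - oe) 0
             else 0) =
            (if (pvTakeRun x (x :: xs)).1 ≥ 5 then (1000000 : Int)
             else PySem.Dict.getD pvScoreTable ((pvTakeRun x (x :: xs)).1, 2 - oe) 0) := by
          intro oe
          by_cases h5 : (pvTakeRun x (x :: xs)).1 ≥ 5
          · simp [h5]
          · rw [if_neg h5, if_neg h5, if_pos (by omega)]
        simp only [hbranch, if_true]
        ring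
      · rw [pvEvalGo, dif_neg hx]
        rw [ih xs (by simp at hlen; omega)]
        rw [pvScoreRuns_skip player x xs prev (fun h => hx h)]

-- ===== VERDICT (by name: the statement is the Claim_ definition above) =====
theorem evaluate_line_spec : Claim_equal_evaluate_line := by
  intro line player _
  unfold Spec_evaluate_line evaluate_line evaluate_line_alt
  simpa using pvEvalGo_eq player line.length line (le_refl _) none 0
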